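-- pv_equiv track=rewrite | github.com/Insaaane/Skillbox_Python | Part 2/Module 3/Task-3.6.py | get_max_people
-- ===== SOURCE A (Python) =====
-- def get_max_people(skates, foot_size):
--     result = 0
--     skates_sorted_list = list(sorted(skates, reverse=True))
--     for size in sorted(foot_size):
--         while len(skates_sorted_list) > 0 and skates_sorted_list[-1] < size:
--             skates_sorted_list.pop()
--         if len(skates_sorted_list) == 0:
--             break
--         if skates_sorted_list[-1] == size:
--             result += 1
--             skates_sorted_list.pop()
--     return result
-- ===== SOURCE B (Python) =====
-- def get_max_people(skates, foot_size):
--     counts = {}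
--     for s in skates:
--         counts[s] = counts.get(s, 0) + 1
--     result = 0
--     for f in foot_size:
--         if counts.get(f, 0) > 0:
--             counts[f] = counts[f] - 1
--             result += 1
--     return result
-- ===== Notes on version B (the rewrite author's own statement) =====
-- stated objective: faster
-- what changed: Replaced sorting both lists and sweeping a descending copy with pop/two-pointer matching by a single pass building a hash-map multiplicity counter over skates and one pass over foot_size decrementing it, i.e. multiset intersection by counting instead of by sorting.
import Mathlib
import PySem

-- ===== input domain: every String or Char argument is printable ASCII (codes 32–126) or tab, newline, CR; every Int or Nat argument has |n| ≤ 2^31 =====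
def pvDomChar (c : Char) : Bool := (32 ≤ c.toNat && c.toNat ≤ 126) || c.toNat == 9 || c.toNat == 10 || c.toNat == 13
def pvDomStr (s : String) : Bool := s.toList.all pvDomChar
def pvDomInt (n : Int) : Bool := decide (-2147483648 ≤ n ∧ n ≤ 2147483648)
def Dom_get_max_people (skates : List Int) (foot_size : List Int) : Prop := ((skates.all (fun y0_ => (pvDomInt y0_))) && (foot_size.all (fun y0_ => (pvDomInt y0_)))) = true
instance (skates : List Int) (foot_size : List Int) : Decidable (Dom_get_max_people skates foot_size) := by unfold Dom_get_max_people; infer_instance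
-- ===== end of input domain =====

-- B replaces A's sort-both-lists-plus-pop sweep by a single hash-counter pass (no sorting); return values proved equal, no argument is mutated by either version.

-- ===== PORT A =====
-- inner while loop: 'while len(l) > 0 and l[-1] < size: l.pop()'  (l[-1] on a nonempty list is getLastD)
def pyWhilePop (l : List Int) (size : Int) : List Int :=
  if h : 0 < l.length ∧ l.getLastD 0 < size then pyWhilePop l.dropLast size else l
termination_by l.length
decreasing_by simp [List.length_dropLast]; omega

-- the 'for size in sorted(foot_size)' loop with its break / match-pop, state = (remaining sizes, skates list desc, result)
def pyMatchLoop : List Int → List Int → Int → Int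
  | [], _, result => result
  | size :: rest, l, result =>
    let l' := pyWhilePop l size
    if l'.length = 0 then result
    else if l'.getLastD 0 = size then pyMatchLoop rest l'.dropLast (result + 1)
    else pyMatchLoop rest l' result

def get_max_people (skates : List Int) (foot_size : List Int) : Int :=
  pyMatchLoop (PySem.List.sorted foot_size (fun x => x) false)
    (PySem.List.sorted skates (fun x => x) true) 0

-- ===== PORT B =====
-- 'for f in foot_size: if counts.get(f,0) > 0: counts[f] = counts[f] - 1; result += 1'
-- (counts[f] equals counts.get(f,0) here because the guard ensures the key is present)
def bMatchLoop : List Int → PySem.Dict Int Int → Int → Int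
  | [], _, result => result
  | f :: rest, counts, result =>
    if 0 < counts.getD f 0 then
      bMatchLoop rest (counts.insert f (counts.getD f 0 - 1)) (result + 1)
    else bMatchLoop rest counts result

def get_max_people_alt (skates : List Int) (foot_size : List Int) : Int :=
  let counts := skates.foldl (fun d s => d.insert s (d.getD s 0 + 1)) PySem.Dict.empty
  bMatchLoop foot_size counts 0

-- ===== PRECONDITION & SPEC =====
def Spec_get_max_people (skates : List Int) (foot_size : List Int) (out : Int) : Prop := out = get_max_people_alt skates foot_size
instance (skates : List Int) (foot_size : List Int) (out : Int) : Decidable (Spec_get_max_people skates foot_size out) := by unfold Spec_get_max_people; infer_instance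

-- ===== CLAIM (what is proved, stated in full; the proofs are below) =====
def Claim_equal_get_max_people : Prop := ∀ (skates : List Int) (foot_size : List Int), Dom_get_max_people skates foot_size → Spec_get_max_people skates foot_size (get_max_people skates foot_size)

-- ===== LEMMAS AND PROOFS =====

-- the common value both programs compute: |skates ∩ foot_size| as multisets

-- ascending-list mirror of A's loop (A works on the reversed, descending list)
def gloop : List Int → List Int → Int → Int
  | [], _, r => r
  | s :: rest, asc, r =>
    match asc.dropWhile (fun x => decide (x < s)) with
    | [] => r
    | x :: t => if x = s then gloop rest t (r + 1) else gloop rest (x :: t) r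

theorem whilePop_rev (as : List Int) (s : Int) :
    pyWhilePop as.reverse s = (as.dropWhile (fun x => decide (x < s))).reverse := by
  induction as with
  | nil => rw [pyWhilePop]; simp
  | cons x t ih =>
    rw [pyWhilePop]
    by_cases hx : x < s
    · rw [dif_pos (by simp [hx])]
      simpa [List.dropLast_concat, hx] using ih
    · rw [dif_neg (by simp [hx])]
      simp [hx]

theorem matchLoop_rev (sizes : List Int) : ∀ (as : List Int) (r : Int),
    pyMatchLoop sizes as.reverse r = gloop sizes as r := by
  induction sizes with
  | nil => intro as r; rfl
  | cons s rest ih =>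
    intro as r
    simp only [pyMatchLoop, gloop, whilePop_rev]
    cases h : as.dropWhile (fun x => decide (x < s)) with
    | nil => simp
    | cons x t =>
      simp only [List.reverse_cons, List.length_append, List.length_reverse,
        List.length_cons, List.length_nil]
      rw [if_neg (by omega)]
      by_cases hx : x = s
      · rw [if_pos (by simp [hx]), List.dropLast_concat, ih, if_pos hx]
      · rw [if_neg (by simp [hx])]
        rw [show t.reverse ++ [x] = (x :: t).reverse by simp, ih, if_neg hx]

theorem head_dropWhile_false (p : Int → Bool) (l : List Int) : ∀ {x t}, l.dropWhile p = x :: t → p x = false := by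
  induction l with
  | nil => intro x t h; simp [List.dropWhile] at h
  | cons a l ih =>
    intro x t h
    by_cases ha : p a
    · exact ih (by simpa [List.dropWhile, ha] using h)
    · simp [List.dropWhile, ha] at h
      simp [← h.1, ha]

theorem inter_drop (u v t : Multiset Int) (h : ∀ y ∈ u, y ∉ t) : (u + v) ∩ t = v ∩ t := by
  ext a
  simp only [Multiset.count_inter, Multiset.count_add]
  by_cases ha : a ∈ u
  · have : a ∉ t := h a ha
    simp [Multiset.count_eq_zero.mpr this]
  · simp [Multiset.count_eq_zero.mpr ha]

theorem gloop_spec (sizes : List Int) : ∀ (asc : List Int) (r : Int),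
    List.Pairwise (· ≤ ·) sizes → List.Pairwise (· ≤ ·) asc →
    gloop sizes asc r = r + (((asc : Multiset Int) ∩ (sizes : Multiset Int)).card : Int) := by
  induction sizes with
  | nil => intro asc r _ _; simp [gloop]
  | cons s rest ih =>
    intro asc r hs ha
    obtain ⟨hsr, hrest⟩ := List.pairwise_cons.mp hs
    -- drop the part of asc strictly below s: none of it meets s :: rest
    have hsplit := List.takeWhile_append_dropWhile (p := fun x => decide (x < s)) (l := asc)
    have hdropped : ∀ y ∈ asc.takeWhile (fun x => decide (x < s)), y ∉ ((s :: rest : List Int) : Multiset Int) := by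
      intro y hy hmem
      have hylt : y < s := by simpa using List.mem_takeWhile_imp hy
      have : y = s ∨ y ∈ rest := by simpa using hmem
      rcases this with h | h
      · omega
      · exact absurd (hsr y h) (by omega)
    have hinter : ((asc : Multiset Int) ∩ ((s :: rest : List Int) : Multiset Int))
        = ((asc.dropWhile (fun x => decide (x < s)) : Multiset Int) ∩ ((s :: rest : List Int) : Multiset Int)) := by
      conv_lhs => rw [← hsplit]
      rw [← Multiset.coe_add]
      exact inter_drop _ _ _ hdropped
    have hdsorted : List.Pairwise (· ≤ ·) (asc.dropWhile (fun x => decide (x < s))) :=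
      ha.sublist (List.dropWhile_sublist _)
    simp only [gloop]
    cases hd : asc.dropWhile (fun x => decide (x < s)) with
    | nil => simp [hinter, hd]
    | cons x t =>
      have hred : (match x :: t with
          | [] => r
          | x :: t => if x = s then gloop rest t (r + 1) else gloop rest (x :: t) r)
          = if x = s then gloop rest t (r + 1) else gloop rest (x :: t) r := rfl
      rw [hred]
      have hxs : s ≤ x := by
        have := head_dropWhile_false _ _ hd
        simp at this; omega
      rw [hd] at hinter hdsorted
      obtain ⟨hxt, htsorted⟩ := List.pairwise_cons.mp hdsorted
      by_cases hx : x = s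
      · rw [if_pos hx]
        rw [ih t (r + 1) hrest htsorted, hinter]
        have : ((x :: t : List Int) : Multiset Int) ∩ ((s :: rest : List Int) : Multiset Int)
            = s ::ₘ ((t : Multiset Int) ∩ (rest : Multiset Int)) := by
          rw [show ((x :: t : List Int) : Multiset Int) = s ::ₘ (t : Multiset Int) by simp [hx],
            show ((s :: rest : List Int) : Multiset Int) = s ::ₘ (rest : Multiset Int) by simp]
          rw [Multiset.cons_inter_of_pos _ (Multiset.mem_cons_self s _), Multiset.erase_cons_head]
        rw [this, Multiset.card_cons]
        push_cast; ring
      · rw [if_neg hx]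
        rw [ih (x :: t) r hrest hdsorted, hinter]
        have hsnot : s ∉ ((x :: t : List Int) : Multiset Int) := by
          intro hmem
          have : s = x ∨ s ∈ t := by simpa using hmem
          rcases this with h | h
          · omega
          · exact absurd (hxt s h) (by omega)
        have : ((x :: t : List Int) : Multiset Int) ∩ ((s :: rest : List Int) : Multiset Int)
            = ((x :: t : List Int) : Multiset Int) ∩ ((rest : List Int) : Multiset Int) := by
          rw [Multiset.inter_comm, show ((s :: rest : List Int) : Multiset Int) = s ::ₘ (rest : Multiset Int) by simp,
            Multiset.cons_inter_of_neg _ hsnot, Multiset.inter_comm]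
        rw [this]

theorem bloop_spec (foot : List Int) : ∀ (m : Multiset Int) (c : PySem.Dict Int Int) (r : Int),
    (∀ x, c.getD x 0 = (m.count x : Int)) →
    bMatchLoop foot c r = r + ((m ∩ (foot : Multiset Int)).card : Int) := by
  induction foot with
  | nil => intro m c r _; simp [bMatchLoop]
  | cons f rest ih =>
    intro m c r hc
    simp only [bMatchLoop]
    by_cases hf : 0 < c.getD f 0
    · rw [if_pos hf]
      have hfm : f ∈ m := by
        rw [hc f] at hf
        exact Multiset.count_pos.mp (by exact_mod_cast hf)
      have hagree : ∀ x, (c.insert f (c.getD f 0 - 1)).getD x 0 = ((m.erase f).count x : Int) := by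
        intro x
        rw [PySem.Dict.getD_insert]
        by_cases hx : x = f
        · subst hx
          rw [hc x, Multiset.count_erase_self]
          have : 1 ≤ m.count x := Multiset.count_pos.mpr hfm
          omega
        · rw [if_neg hx, hc x, Multiset.count_erase_of_ne hx]
      rw [ih (m.erase f) _ (r + 1) hagree]
      have : m ∩ ((f :: rest : List Int) : Multiset Int) = f ::ₘ ((m.erase f) ∩ (rest : Multiset Int)) := by
        rw [Multiset.inter_comm, show ((f :: rest : List Int) : Multiset Int) = f ::ₘ (rest : Multiset Int) by simp,
          Multiset.cons_inter_of_pos _ hfm, Multiset.inter_comm]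
      rw [this, Multiset.card_cons]
      push_cast; ring
    · rw [if_neg hf]
      have hfm : f ∉ m := by
        intro hmem
        have := Multiset.count_pos.mpr hmem
        rw [hc f] at hf
        omega
      rw [ih m c r hc]
      have : m ∩ ((f :: rest : List Int) : Multiset Int) = m ∩ (rest : Multiset Int) := by
        rw [Multiset.inter_comm, show ((f :: rest : List Int) : Multiset Int) = f ::ₘ (rest : Multiset Int) by simp,
          Multiset.cons_inter_of_neg _ hfm, Multiset.inter_comm]
      rw [this]

-- ===== VERDICT (by name: the statement is the Claim_ definition above) =====
theorem get_max_people_spec : Claim_equal_get_max_people := by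
  intro skates foot_size _
  unfold Spec_get_max_people get_max_people get_max_people_alt
  have hA : PySem.List.sorted skates (fun x => x) true
      = ((PySem.List.sorted skates (fun x => x) true).reverse).reverse := by simp
  rw [hA, matchLoop_rev]
  rw [gloop_spec _ _ 0 (by simpa using PySem.List.sorted_pairwise foot_size (fun x => x))
    (by simpa [List.pairwise_reverse] using PySem.List.sorted_pairwise_rev skates (fun x => x))]
  rw [bloop_spec foot_size (skates : Multiset Int) _ 0
    (by intro x; rw [PySem.Dict.getD_foldl_insert_add_one, PySem.Dict.getD_empty]; simp)]
  have e1 : (((PySem.List.sorted skates (fun x => x) true).reverse : List Int) : Multiset Int) = (skates : Multiset Int) :=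
    Multiset.coe_eq_coe.mpr ((List.reverse_perm _).trans (PySem.List.sorted_perm skates (fun x => x) true))
  have e2 : ((PySem.List.sorted foot_size (fun x => x) false : List Int) : Multiset Int) = (foot_size : Multiset Int) :=
    Multiset.coe_eq_coe.mpr (PySem.List.sorted_perm foot_size (fun x => x) false)
  rw [e1, e2]
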